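-- pv_equiv track=rewrite | github.com/BanelhaqB/iapau-api | model/executable.py | checker_dict
-- ===== SOURCE A (Python) =====
-- interest_zone_ref_dict = {
--     "depth": {
--         1: ["depth", "mbrt", "md", "mrkb", "tvd", "tvdss"],
--         2: ["depth mrkb", "depth mbrt", "measured depth", "depth m", "tvd m", "tvdss m", "tvd ft", "tvdss ft", "true vertical", "t vert", "true vert", "vert depth", "vertical depth", "tvd subsea"],
--         3: ["measured depth mrkb", "measured depth mbrt", "true vertical depth", "t vert depth", "vertical depth m", "vert depth m", "vertical depth ft", "vert depth ft", "vertical depth subsea"],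
--         4: ["true vertical depth subsea", "true vertical depth m", "true vertical depth ft", "vertical depth sub sea", "vertical depth subsea m", "vertical depth subsea ft"],
--         5: ["true vertical depth subsea m", "true vertical depth subsea ft"]
--     },
--     "pressure": {
--         1: ["absolute", "fp_absolute", "psia", "fpa", "fpapsi", "pfa", "quartz", "fpapsi", "pretest", "strained", "fp", "pf", "fppsi", "pfpsi", "str"],
--         2: ["absolute fp", "absolute formation", "absolute pressure", "pressure psia", "fp psia", "fp absolute", "fp abs", "pf psia", "pf abs", "pf absolute", "pretest pressure", "temp corr", "formation pressure", "corr formation", "corrected formation", "corr pressure", "corrected pressure", "form pressure", "form press", "str pressure", "f p"],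
--         3: ["absolute formation pressure", "absolute fp psi", "absolute fp psia", "temp corr formation", "corr formation pressure", "corrected formation pressure", "temperature corrected formation", "formation pressure psig"],
--         4: ["absolute formation pressure psi", "absolute formation pressure psia", "temp corr formation pressure", "temperature corrected formation pressure", "corrected formation pressure psig", "corr formation pressure psig"],
--         5: ["temp corr formation pressure psig", "temperature corrected formation pressure psig"]
--     },
--     "test": {
--         1: ["rft", "fmt", "temp corrected"],
--         2: ["temp corrected", "formation tester"],
--         3: ["temp corrected results"]
--     },
--     "quality_test": {
--         1: ["permeability", "perm", "quality", "comments", "comm", "remarks", "notes"],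
--         2: ["quality test", "permeability test", "test quality"]
--     },
--     "mobility": {
--         1: ["md/cp", "mobility", "mob", "mdcp-1"],
--         2: ["mobility md/cp", "permeability md/cp", "perm md/cp", "perm mdcp-1", "mob md/cp", "mobility mdcp-1, mob mdcp-1"]
--     }
-- }
--
-- def checker_dict(mot):
--     dict1 = []
--     dict3 = []
--     remot = []
--     for i in interest_zone_ref_dict.keys():
--         dict1.append(i)
--
--     for e in dict1:
--         dict2 = interest_zone_ref_dict[e]
--         long = len(dict2)
--
--         j = 1
--         while j <= long:
--             for f in dict2[j]:
--                 if mot == f: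
--                     return e
--             j += 1
--
--     return mot
-- ===== SOURCE B (Python) =====
-- # Flat reverse index: word -> category, derived once from interest_zone_ref_dict
-- # (categories in insertion order, levels 1..n, first occurrence of a word wins),
-- # so classification is a single dict lookup instead of a nested scan.
-- _WORD_CATEGORY = {
--     'depth': 'depth',
--     'mbrt': 'depth',
--     'md': 'depth',
--     'mrkb': 'depth',
--     'tvd': 'depth',
--     'tvdss': 'depth',
--     'depth mrkb': 'depth',
--     'depth mbrt': 'depth',
--     'measured depth': 'depth',
--     'depth m': 'depth',
--     'tvd m': 'depth',
--     'tvdss m': 'depth',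
--     'tvd ft': 'depth',
--     'tvdss ft': 'depth',
--     'true vertical': 'depth',
--     't vert': 'depth',
--     'true vert': 'depth',
--     'vert depth': 'depth',
--     'vertical depth': 'depth',
--     'tvd subsea': 'depth',
--     'measured depth mrkb': 'depth',
--     'measured depth mbrt': 'depth',
--     'true vertical depth': 'depth',
--     't vert depth': 'depth',
--     'vertical depth m': 'depth',
--     'vert depth m': 'depth',
--     'vertical depth ft': 'depth',
--     'vert depth ft': 'depth',
--     'vertical depth subsea': 'depth',
--     'true vertical depth subsea': 'depth',
--     'true vertical depth m': 'depth',
--     'true vertical depth ft': 'depth',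
--     'vertical depth sub sea': 'depth',
--     'vertical depth subsea m': 'depth',
--     'vertical depth subsea ft': 'depth',
--     'true vertical depth subsea m': 'depth',
--     'true vertical depth subsea ft': 'depth',
--     'absolute': 'pressure',
--     'fp_absolute': 'pressure',
--     'psia': 'pressure',
--     'fpa': 'pressure',
--     'fpapsi': 'pressure',
--     'pfa': 'pressure',
--     'quartz': 'pressure',
--     'pretest': 'pressure',
--     'strained': 'pressure',
--     'fp': 'pressure',
--     'pf': 'pressure',
--     'fppsi': 'pressure',
--     'pfpsi': 'pressure',
--     'str': 'pressure',
--     'absolute fp': 'pressure',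
--     'absolute formation': 'pressure',
--     'absolute pressure': 'pressure',
--     'pressure psia': 'pressure',
--     'fp psia': 'pressure',
--     'fp absolute': 'pressure',
--     'fp abs': 'pressure',
--     'pf psia': 'pressure',
--     'pf abs': 'pressure',
--     'pf absolute': 'pressure',
--     'pretest pressure': 'pressure',
--     'temp corr': 'pressure',
--     'formation pressure': 'pressure',
--     'corr formation': 'pressure',
--     'corrected formation': 'pressure',
--     'corr pressure': 'pressure',
--     'corrected pressure': 'pressure',
--     'form pressure': 'pressure',
--     'form press': 'pressure',
--     'str pressure': 'pressure',
--     'f p': 'pressure',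
--     'absolute formation pressure': 'pressure',
--     'absolute fp psi': 'pressure',
--     'absolute fp psia': 'pressure',
--     'temp corr formation': 'pressure',
--     'corr formation pressure': 'pressure',
--     'corrected formation pressure': 'pressure',
--     'temperature corrected formation': 'pressure',
--     'formation pressure psig': 'pressure',
--     'absolute formation pressure psi': 'pressure',
--     'absolute formation pressure psia': 'pressure',
--     'temp corr formation pressure': 'pressure',
--     'temperature corrected formation pressure': 'pressure',
--     'corrected formation pressure psig': 'pressure',
--     'corr formation pressure psig': 'pressure',
--     'temp corr formation pressure psig': 'pressure',
--     'temperature corrected formation pressure psig': 'pressure',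
--     'rft': 'test',
--     'fmt': 'test',
--     'temp corrected': 'test',
--     'formation tester': 'test',
--     'temp corrected results': 'test',
--     'permeability': 'quality_test',
--     'perm': 'quality_test',
--     'quality': 'quality_test',
--     'comments': 'quality_test',
--     'comm': 'quality_test',
--     'remarks': 'quality_test',
--     'notes': 'quality_test',
--     'quality test': 'quality_test',
--     'permeability test': 'quality_test',
--     'test quality': 'quality_test',
--     'md/cp': 'mobility',
--     'mobility': 'mobility',
--     'mob': 'mobility',
--     'mdcp-1': 'mobility',
--     'mobility md/cp': 'mobility',
--     'permeability md/cp': 'mobility',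
--     'perm md/cp': 'mobility',
--     'perm mdcp-1': 'mobility',
--     'mob md/cp': 'mobility',
--     'mobility mdcp-1, mob mdcp-1': 'mobility',
-- }
--
-- def checker_dict(mot):
--     try:
--         return _WORD_CATEGORY.get(mot, mot)
--     except TypeError:  # unhashable mot: no table word can equal it
--         return mot
-- ===== Notes on version B (the rewrite author's own statement) =====
-- stated objective: faster
-- what changed: Replaces A's per-call nested scan over categories, numbered levels and word lists by a flat precomputed word-to-category dictionary (first occurrence wins, written out at module level) so each call is a single dict lookup with the word itself as default.
import Mathlib
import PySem

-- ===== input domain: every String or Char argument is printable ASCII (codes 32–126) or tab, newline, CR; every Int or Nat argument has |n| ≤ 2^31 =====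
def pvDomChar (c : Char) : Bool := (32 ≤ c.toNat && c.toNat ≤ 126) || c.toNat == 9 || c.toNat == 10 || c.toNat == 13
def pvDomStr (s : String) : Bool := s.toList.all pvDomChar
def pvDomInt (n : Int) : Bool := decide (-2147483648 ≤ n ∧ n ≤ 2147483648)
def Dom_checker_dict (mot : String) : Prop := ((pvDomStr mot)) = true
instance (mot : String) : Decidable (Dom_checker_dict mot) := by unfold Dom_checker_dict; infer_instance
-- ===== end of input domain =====

-- B replaces A's per-call nested scan of the category table by a flat precomputed
-- word→category dictionary (first occurrence wins) and a single lookup (objective: faster per call).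

-- ===== PORT A =====
-- module constant interest_zone_ref_dict (dict of dicts, keys 1..n in insertion order)
def pvTable : List (String × PySem.Dict Int (List String)) := [
  ("depth", PySem.Dict.mk [
    (1, ["depth", "mbrt", "md", "mrkb", "tvd", "tvdss"]),
    (2, ["depth mrkb", "depth mbrt", "measured depth", "depth m", "tvd m", "tvdss m", "tvd ft", "tvdss ft", "true vertical", "t vert", "true vert", "vert depth", "vertical depth", "tvd subsea"]),
    (3, ["measured depth mrkb", "measured depth mbrt", "true vertical depth", "t vert depth", "vertical depth m", "vert depth m", "vertical depth ft", "vert depth ft", "vertical depth subsea"]),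
    (4, ["true vertical depth subsea", "true vertical depth m", "true vertical depth ft", "vertical depth sub sea", "vertical depth subsea m", "vertical depth subsea ft"]),
    (5, ["true vertical depth subsea m", "true vertical depth subsea ft"])
  ]),
  ("pressure", PySem.Dict.mk [
    (1, ["absolute", "fp_absolute", "psia", "fpa", "fpapsi", "pfa", "quartz", "fpapsi", "pretest", "strained", "fp", "pf", "fppsi", "pfpsi", "str"]),
    (2, ["absolute fp", "absolute formation", "absolute pressure", "pressure psia", "fp psia", "fp absolute", "fp abs", "pf psia", "pf abs", "pf absolute", "pretest pressure", "temp corr", "formation pressure", "corr formation", "corrected formation", "corr pressure", "corrected pressure", "form pressure", "form press", "str pressure", "f p"]),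
    (3, ["absolute formation pressure", "absolute fp psi", "absolute fp psia", "temp corr formation", "corr formation pressure", "corrected formation pressure", "temperature corrected formation", "formation pressure psig"]),
    (4, ["absolute formation pressure psi", "absolute formation pressure psia", "temp corr formation pressure", "temperature corrected formation pressure", "corrected formation pressure psig", "corr formation pressure psig"]),
    (5, ["temp corr formation pressure psig", "temperature corrected formation pressure psig"])
  ]),
  ("test", PySem.Dict.mk [
    (1, ["rft", "fmt", "temp corrected"]),
    (2, ["temp corrected", "formation tester"]),
    (3, ["temp corrected results"])
  ]),
  ("quality_test", PySem.Dict.mk [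
    (1, ["permeability", "perm", "quality", "comments", "comm", "remarks", "notes"]),
    (2, ["quality test", "permeability test", "test quality"])
  ]),
  ("mobility", PySem.Dict.mk [
    (1, ["md/cp", "mobility", "mob", "mdcp-1"]),
    (2, ["mobility md/cp", "permeability md/cp", "perm md/cp", "perm mdcp-1", "mob md/cp", "mobility mdcp-1, mob mdcp-1"])
  ])
]

-- inner `for f in dict2[j]` loop
def pvForWords (mot e : String) : List String → Option String
  | [] => none
  | f :: rest => if mot == f then some e else pvForWords mot e rest

-- `j = 1; while j <= long: … ; j += 1`; fuel only makes the loop total (it is long.toNat at the call)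
def pvWhileJ (mot e : String) (dict2 : PySem.Dict Int (List String)) (long j : Int) : Nat → Option String
  | 0 => none
  | fuel + 1 =>
    if j ≤ long then
      match pvForWords mot e (dict2.getD j []) with  -- dict2[j]; keys are exactly 1..long, so no KeyError
      | some r => some r
      | none => pvWhileJ mot e dict2 long (j + 1) fuel
    else none

-- `for e in dict1` (dict1 = list of the keys, paired here with their values)
def pvForCats (mot : String) : List (String × PySem.Dict Int (List String)) → Option String
  | [] => none
  | (e, dict2) :: rest =>
    match pvWhileJ mot e dict2 (dict2.size : Int) 1 dict2.size with
    | some r => some r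
    | none => pvForCats mot rest

def checker_dict (mot : String) : String := (pvForCats mot pvTable).getD mot

-- ===== PORT B =====
-- _WORD_CATEGORY: the flat reverse index of Source B, a module-level literal
def pvWordCategory : PySem.Dict String String := PySem.Dict.mk [
  ("depth", "depth"),
  ("mbrt", "depth"),
  ("md", "depth"),
  ("mrkb", "depth"),
  ("tvd", "depth"),
  ("tvdss", "depth"),
  ("depth mrkb", "depth"),
  ("depth mbrt", "depth"),
  ("measured depth", "depth"),
  ("depth m", "depth"),
  ("tvd m", "depth"),
  ("tvdss m", "depth"),
  ("tvd ft", "depth"),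
  ("tvdss ft", "depth"),
  ("true vertical", "depth"),
  ("t vert", "depth"),
  ("true vert", "depth"),
  ("vert depth", "depth"),
  ("vertical depth", "depth"),
  ("tvd subsea", "depth"),
  ("measured depth mrkb", "depth"),
  ("measured depth mbrt", "depth"),
  ("true vertical depth", "depth"),
  ("t vert depth", "depth"),
  ("vertical depth m", "depth"),
  ("vert depth m", "depth"),
  ("vertical depth ft", "depth"),
  ("vert depth ft", "depth"),
  ("vertical depth subsea", "depth"),
  ("true vertical depth subsea", "depth"),
  ("true vertical depth m", "depth"),
  ("true vertical depth ft", "depth"),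
  ("vertical depth sub sea", "depth"),
  ("vertical depth subsea m", "depth"),
  ("vertical depth subsea ft", "depth"),
  ("true vertical depth subsea m", "depth"),
  ("true vertical depth subsea ft", "depth"),
  ("absolute", "pressure"),
  ("fp_absolute", "pressure"),
  ("psia", "pressure"),
  ("fpa", "pressure"),
  ("fpapsi", "pressure"),
  ("pfa", "pressure"),
  ("quartz", "pressure"),
  ("pretest", "pressure"),
  ("strained", "pressure"),
  ("fp", "pressure"),
  ("pf", "pressure"),
  ("fppsi", "pressure"),
  ("pfpsi", "pressure"),
  ("str", "pressure"),
  ("absolute fp", "pressure"),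
  ("absolute formation", "pressure"),
  ("absolute pressure", "pressure"),
  ("pressure psia", "pressure"),
  ("fp psia", "pressure"),
  ("fp absolute", "pressure"),
  ("fp abs", "pressure"),
  ("pf psia", "pressure"),
  ("pf abs", "pressure"),
  ("pf absolute", "pressure"),
  ("pretest pressure", "pressure"),
  ("temp corr", "pressure"),
  ("formation pressure", "pressure"),
  ("corr formation", "pressure"),
  ("corrected formation", "pressure"),
  ("corr pressure", "pressure"),
  ("corrected pressure", "pressure"),
  ("form pressure", "pressure"),
  ("form press", "pressure"),
  ("str pressure", "pressure"),
  ("f p", "pressure"),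
  ("absolute formation pressure", "pressure"),
  ("absolute fp psi", "pressure"),
  ("absolute fp psia", "pressure"),
  ("temp corr formation", "pressure"),
  ("corr formation pressure", "pressure"),
  ("corrected formation pressure", "pressure"),
  ("temperature corrected formation", "pressure"),
  ("formation pressure psig", "pressure"),
  ("absolute formation pressure psi", "pressure"),
  ("absolute formation pressure psia", "pressure"),
  ("temp corr formation pressure", "pressure"),
  ("temperature corrected formation pressure", "pressure"),
  ("corrected formation pressure psig", "pressure"),
  ("corr formation pressure psig", "pressure"),
  ("temp corr formation pressure psig", "pressure"),
  ("temperature corrected formation pressure psig", "pressure"),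
  ("rft", "test"),
  ("fmt", "test"),
  ("temp corrected", "test"),
  ("formation tester", "test"),
  ("temp corrected results", "test"),
  ("permeability", "quality_test"),
  ("perm", "quality_test"),
  ("quality", "quality_test"),
  ("comments", "quality_test"),
  ("comm", "quality_test"),
  ("remarks", "quality_test"),
  ("notes", "quality_test"),
  ("quality test", "quality_test"),
  ("permeability test", "quality_test"),
  ("test quality", "quality_test"),
  ("md/cp", "mobility"),
  ("mobility", "mobility"),
  ("mob", "mobility"),
  ("mdcp-1", "mobility"),
  ("mobility md/cp", "mobility"),
  ("permeability md/cp", "mobility"),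
  ("perm md/cp", "mobility"),
  ("perm mdcp-1", "mobility"),
  ("mob md/cp", "mobility"),
  ("mobility mdcp-1, mob mdcp-1", "mobility")
]

-- _WORD_CATEGORY.get(mot, mot); the `except TypeError` branch is unreachable for a String argument
def checker_dict_alt (mot : String) : String := pvWordCategory.getD mot mot

-- ===== PRECONDITION & SPEC =====
def Spec_checker_dict (mot : String) (out : String) : Prop := out = checker_dict_alt mot
instance (mot : String) (out : String) : Decidable (Spec_checker_dict mot out) := by unfold Spec_checker_dict; infer_instance

-- ===== CLAIM (what is proved, stated in full; the proofs are below) =====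
def Claim_equal_checker_dict : Prop := ∀ (mot : String), Dom_checker_dict mot → Spec_checker_dict mot (checker_dict mot)

-- ===== LEMMAS AND PROOFS =====
-- every word of the table, in A's scan order
def pvAllWords : List String := [
  "depth",
  "mbrt",
  "md",
  "mrkb",
  "tvd",
  "tvdss",
  "depth mrkb",
  "depth mbrt",
  "measured depth",
  "depth m",
  "tvd m",
  "tvdss m",
  "tvd ft",
  "tvdss ft",
  "true vertical",
  "t vert",
  "true vert",
  "vert depth",
  "vertical depth",
  "tvd subsea",
  "measured depth mrkb",
  "measured depth mbrt",
  "true vertical depth",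
  "t vert depth",
  "vertical depth m",
  "vert depth m",
  "vertical depth ft",
  "vert depth ft",
  "vertical depth subsea",
  "true vertical depth subsea",
  "true vertical depth m",
  "true vertical depth ft",
  "vertical depth sub sea",
  "vertical depth subsea m",
  "vertical depth subsea ft",
  "true vertical depth subsea m",
  "true vertical depth subsea ft",
  "absolute",
  "fp_absolute",
  "psia",
  "fpa",
  "fpapsi",
  "pfa",
  "quartz",
  "fpapsi",
  "pretest",
  "strained",
  "fp",
  "pf",
  "fppsi",
  "pfpsi",
  "str",
  "absolute fp",
  "absolute formation",
  "absolute pressure",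
  "pressure psia",
  "fp psia",
  "fp absolute",
  "fp abs",
  "pf psia",
  "pf abs",
  "pf absolute",
  "pretest pressure",
  "temp corr",
  "formation pressure",
  "corr formation",
  "corrected formation",
  "corr pressure",
  "corrected pressure",
  "form pressure",
  "form press",
  "str pressure",
  "f p",
  "absolute formation pressure",
  "absolute fp psi",
  "absolute fp psia",
  "temp corr formation",
  "corr formation pressure",
  "corrected formation pressure",
  "temperature corrected formation",
  "formation pressure psig",
  "absolute formation pressure psi",
  "absolute formation pressure psia",
  "temp corr formation pressure",
  "temperature corrected formation pressure",
  "corrected formation pressure psig",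
  "corr formation pressure psig",
  "temp corr formation pressure psig",
  "temperature corrected formation pressure psig",
  "rft",
  "fmt",
  "temp corrected",
  "temp corrected",
  "formation tester",
  "temp corrected results",
  "permeability",
  "perm",
  "quality",
  "comments",
  "comm",
  "remarks",
  "notes",
  "quality test",
  "permeability test",
  "test quality",
  "md/cp",
  "mobility",
  "mob",
  "mdcp-1",
  "mobility md/cp",
  "permeability md/cp",
  "perm md/cp",
  "perm mdcp-1",
  "mob md/cp",
  "mobility mdcp-1, mob mdcp-1"
]

theorem pvForWords_of_not_mem (mot e : String) (l : List String) (h : mot ∉ l) :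
    pvForWords mot e l = none := by
  induction l with
  | nil => rfl
  | cons f rest ih =>
    simp only [List.mem_cons, not_or] at h
    simp [pvForWords, h.1, ih h.2]

theorem pvWhileJ_of_not_mem (mot e : String) (dict2 : PySem.Dict Int (List String))
    (long j : Int) (fuel : Nat) (h : mot ∉ dict2.values.flatten) :
    pvWhileJ mot e dict2 long j fuel = none := by
  induction fuel generalizing j with
  | zero => rfl
  | succ n ih =>
    simp only [pvWhileJ]
    split
    · have hw : pvForWords mot e (dict2.getD j []) = none := by
        apply pvForWords_of_not_mem
        intro hmem
        rcases hg : dict2.get? j with _ | v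
        · simp [PySem.Dict.getD_of_get?_eq_none dict2 [] hg] at hmem
        · have hv : v ∈ dict2.values :=
            List.mem_map_of_mem (PySem.Dict.mem_items_of_get?_eq_some dict2 hg)
          rw [PySem.Dict.getD_of_get?_eq_some dict2 [] hg] at hmem
          exact h (List.mem_flatten.mpr ⟨v, hv, hmem⟩)
      rw [hw]; exact ih (j + 1)
    · rfl

theorem pvForCats_of_not_mem (mot : String)
    (tbl : List (String × PySem.Dict Int (List String)))
    (h : mot ∉ tbl.flatMap (fun p => p.2.values.flatten)) :
    pvForCats mot tbl = none := by
  induction tbl with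
  | nil => rfl
  | cons p rest ih =>
    simp only [List.flatMap_cons, List.mem_append, not_or] at h
    obtain ⟨e, dict2⟩ := p
    simp only [pvForCats]
    rw [pvWhileJ_of_not_mem mot e dict2 _ _ _ h.1]
    exact ih h.2

set_option maxHeartbeats 2000000 in
set_option maxRecDepth 100000 in
theorem keys_sub : ∀ k ∈ pvWordCategory.keys, k ∈ pvAllWords := by decide

set_option maxHeartbeats 2000000 in
set_option maxRecDepth 100000 in
theorem agree_on_words :
    ∀ m ∈ pvAllWords, checker_dict m = checker_dict_alt m := by decide

theorem allWords_eq :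
    pvAllWords = pvTable.flatMap (fun p => p.2.values.flatten) := by decide

-- ===== VERDICT (by name: the statement is the Claim_ definition above) =====
theorem checker_dict_spec : Claim_equal_checker_dict := by
  intro mot _
  unfold Spec_checker_dict
  by_cases hm : mot ∈ pvAllWords
  · exact agree_on_words mot hm
  · have hA : checker_dict mot = mot := by
      unfold checker_dict
      rw [pvForCats_of_not_mem mot pvTable (allWords_eq ▸ hm)]
      rfl
    have hB : pvWordCategory.get? mot = none :=
      (PySem.Dict.get?_eq_none_iff_not_mem_keys pvWordCategory mot).mpr (fun hk => hm (keys_sub mot hk))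
    rw [hA]
    unfold checker_dict_alt
    rw [PySem.Dict.getD_of_get?_eq_none pvWordCategory mot hB]
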